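-- pv_equiv track=rewrite | github.com/douymLab/PhyloSOLID | src/mutation_integrator.py | get_leafBranchSet
-- ===== SOURCE A (Python) =====
-- def intersect_is_self(v1, v0):
--     # If True, v1 is a subset of v0
--     v0_indices = [i for i, val in enumerate(v0) if val == 1]
--     v1_indices = [i for i, val in enumerate(v1) if val == 1]
--     v0_set = set(v0_indices)
--     v1_set = set(v1_indices)
--     if v1_set == v1_set.intersection(v0_set):
--         return True
--     else:
--         return False
--
-- def get_leafBranchSet(all_clusters):
--     leaf_clusters = []
--     for i, v1 in enumerate(all_clusters):
--         is_leaf = True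
--         for j, v0 in enumerate(all_clusters):
--             if i != j:
--                 if intersect_is_self(v0, v1):
--                     is_leaf = False
--         if is_leaf:
--             leaf_clusters.append(v1)
--     return leaf_clusters
-- ===== SOURCE B (Python) =====
-- def _is_sorted_subset(t, s):
--     # subset test by merging two strictly increasing index tuples
--     i = j = 0
--     while i < len(t) and j < len(s):
--         if t[i] == s[j]:
--             i += 1
--             j += 1
--         elif s[j] < t[i]:
--             j += 1
--         else:
--             return False
--     return i == len(t)
--
-- def get_leafBranchSet(all_clusters):
--     idx = [tuple(i for i, x in enumerate(v) if x == 1) for v in all_clusters]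
--     counts = {}
--     for t in idx:
--         counts[t] = counts.get(t, 0) + 1
--     out = []
--     for v, s in zip(all_clusters, idx):
--         if not any((t != s or c > 1) and _is_sorted_subset(t, s)
--                    for t, c in counts.items()):
--             out.append(v)
--     return out
-- ===== Notes on version B (the rewrite author's own statement) =====
-- stated objective: faster
-- what changed: Instead of rebuilding index sets and set-intersections for every ordered pair, B precomputes each cluster's sorted 1-index tuple once, counts the distinct tuples in a dict, and declares a cluster a leaf iff no distinct-tuple key (other than its own, or its own when it occurs twice) is a subset of it via a linear two-pointer merge on the sorted tuples.
import Mathlib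
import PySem

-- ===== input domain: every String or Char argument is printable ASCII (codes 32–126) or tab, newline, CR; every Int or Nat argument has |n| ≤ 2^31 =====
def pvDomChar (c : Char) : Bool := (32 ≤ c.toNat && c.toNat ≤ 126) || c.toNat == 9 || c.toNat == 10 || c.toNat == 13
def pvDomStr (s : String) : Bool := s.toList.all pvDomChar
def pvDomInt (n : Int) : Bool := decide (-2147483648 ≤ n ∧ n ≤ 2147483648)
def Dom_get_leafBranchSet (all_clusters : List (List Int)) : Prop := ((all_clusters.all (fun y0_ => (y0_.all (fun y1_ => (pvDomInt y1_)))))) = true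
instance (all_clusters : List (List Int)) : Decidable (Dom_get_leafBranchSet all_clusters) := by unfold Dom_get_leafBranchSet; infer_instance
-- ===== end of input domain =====

-- B precomputes each cluster's sorted 1-index list once, counts the distinct lists in a dict,
-- and tests subset by a linear merge against the distinct keys only (objective: faster).

-- ===== PORT A =====
def intersect_is_self (v1 v0 : List Int) : Bool :=
  let v0_indices := (PySem.List.enumerate v0).foldl (fun acc p => if p.2 == 1 then acc ++ [p.1] else acc) []
  let v1_indices := (PySem.List.enumerate v1).foldl (fun acc p => if p.2 == 1 then acc ++ [p.1] else acc) []
  let v0_set : PySem.Set Int := PySem.Set.ofList v0_indices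
  let v1_set : PySem.Set Int := PySem.Set.ofList v1_indices
  if PySem.Set.equal v1_set (PySem.Set.inter v1_set v0_set) then true else false

def get_leafBranchSet (all_clusters : List (List Int)) : List (List Int) :=
  (PySem.List.enumerate all_clusters).foldl (fun leaf_clusters p =>
    let is_leaf := (PySem.List.enumerate all_clusters).foldl (fun acc q =>
      if p.1 ≠ q.1 then (if intersect_is_self q.2 p.2 then false else acc) else acc) true
    if is_leaf then leaf_clusters ++ [p.2] else leaf_clusters) []

-- ===== PORT B =====
-- two-pointer subset test on strictly increasing index lists (Source B's _is_sorted_subset)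
def isSortedSubset : List Int → List Int → Bool
  | [], _ => true
  | _ :: _, [] => false
  | a :: as, b :: bs =>
      if a == b then isSortedSubset as bs
      else if b < a then isSortedSubset (a :: as) bs
      else false

def get_leafBranchSet_alt (all_clusters : List (List Int)) : List (List Int) :=
  let idx := all_clusters.map (fun v =>
    (PySem.List.enumerate v).foldl (fun acc p => if p.2 == 1 then acc ++ [p.1] else acc) [])
  let counts : PySem.Dict (List Int) Int :=
    idx.foldl (fun d t => d.insert t (d.getD t 0 + 1)) PySem.Dict.empty
  (all_clusters.zip idx).foldl (fun out p =>
    if counts.items.any (fun tc => (!(tc.1 == p.2) || decide (1 < tc.2)) && isSortedSubset tc.1 p.2)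
    then out else out ++ [p.1]) []

-- ===== PRECONDITION & SPEC =====
def Spec_get_leafBranchSet (all_clusters : List (List Int)) (out : List (List Int)) : Prop := out = get_leafBranchSet_alt all_clusters
instance (all_clusters : List (List Int)) (out : List (List Int)) : Decidable (Spec_get_leafBranchSet all_clusters out) := by unfold Spec_get_leafBranchSet; infer_instance

-- ===== CLAIM (what is proved, stated in full; the proofs are below) =====
def Claim_equal_get_leafBranchSet : Prop := ∀ (all_clusters : List (List Int)), Dom_get_leafBranchSet all_clusters → Spec_get_leafBranchSet all_clusters (get_leafBranchSet all_clusters)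

-- ===== LEMMAS AND PROOFS =====

-- the 1-index list of a cluster, and the keep-predicate both programs are shown to compute
def pvIdx (v : List Int) : List Int :=
  ((PySem.List.enumerate v).filter (fun p => p.2 == 1)).map (·.1)

def pvKeep (idxs : List (List Int)) (s : List Int) : Bool :=
  decide (¬ ∃ t ∈ idxs, (∀ x ∈ t, x ∈ s) ∧ (t ≠ s ∨ 2 ≤ idxs.count t))

theorem pvIdx_fold (v : List Int) :
    (PySem.List.enumerate v).foldl (fun acc p => if p.2 == 1 then acc ++ [p.1] else acc) [] = pvIdx v := by
  simpa [pvIdx] using PySem.List.foldl_append_if (fun p => p.2 == 1) (fun p : Int × Int => p.1) (PySem.List.enumerate v) []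

theorem pvIdx_sorted (v : List Int) : (pvIdx v).Pairwise (· < ·) := by
  have h := PySem.List.pairwise_lt_enumerate v 0
  exact List.pairwise_map.mpr (List.Pairwise.sublist List.filter_sublist h)

theorem isSortedSubset_iff (t s : List Int) (ht : t.Pairwise (· < ·)) (hs : s.Pairwise (· < ·)) :
    isSortedSubset t s = true ↔ ∀ x ∈ t, x ∈ s := by
  induction t, s using isSortedSubset.induct with
  | case1 s => simp [isSortedSubset]
  | case2 a as =>
      simp only [isSortedSubset]
      constructor
      · intro h; cases h
      · intro h; exact absurd (h a List.mem_cons_self) (by simp)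
  | case3 a as b bs hab ih =>
      have hab' : a = b := by simpa using hab
      subst hab'
      rw [isSortedSubset, if_pos (by simp)]
      rw [ih ht.of_cons hs.of_cons]
      constructor
      · intro h x hx
        rcases List.mem_cons.mp hx with rfl | hx'
        · exact List.mem_cons_self
        · exact List.mem_cons_of_mem _ (h x hx')
      · intro h x hx
        rcases List.mem_cons.mp (h x (List.mem_cons_of_mem _ hx)) with rfl | hxs
        · exact absurd (List.rel_of_pairwise_cons ht hx) (lt_irrefl x)
        · exact hxs
  | case4 a as b bs hab hba ih =>
      rw [isSortedSubset, if_neg (by exact hab), if_pos (by exact_mod_cast hba)]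
      rw [ih ht hs.of_cons]
      constructor
      · intro h x hx
        exact List.mem_cons_of_mem _ (h x hx)
      · intro h x hx
        rcases List.mem_cons.mp (h x hx) with rfl | hxs
        · rcases List.mem_cons.mp hx with rfl | hx'
          · exact absurd hba (lt_irrefl _)
          · exact absurd (lt_trans hba (List.rel_of_pairwise_cons ht hx')) (lt_irrefl _)
        · exact hxs
  | case5 a as b bs hab hba =>
      rw [isSortedSubset, if_neg (by exact hab), if_neg (by exact hba)]
      have hab' : a ≠ b := by simpa using hab
      have hlt : a < b := lt_of_le_of_ne (not_lt.mp hba) hab'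
      constructor
      · intro h; cases h
      · intro h
        rcases List.mem_cons.mp (h a List.mem_cons_self) with rfl | h'
        · exact absurd rfl hab'
        · exact absurd (List.rel_of_pairwise_cons hs h') (by omega)

theorem intersect_is_self_iff (v0 v1 : List Int) :
    intersect_is_self v0 v1 = true ↔ ∀ x ∈ pvIdx v0, x ∈ pvIdx v1 := by
  unfold intersect_is_self
  rw [pvIdx_fold, pvIdx_fold]
  simp only [PySem.Set.equal, PySem.Set.issubset, PySem.Set.contains, PySem.Set.inter, List.contains_eq_mem,
    PySem.Set.mem_ofList, List.mem_filter, decide_eq_true_eq, Bool.decide_and, List.all_filter, Bool.and_eq_true,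
    List.all_eq_true, Bool.or_eq_true, Bool.not_eq_eq_eq_not, Bool.not_true, decide_eq_false_iff_not,
    Bool.if_false_right, Bool.and_true]
  exact ⟨fun h x hx => (h.1 x hx).2, fun h => ⟨fun x hx => ⟨hx, h x hx⟩, fun x hx => Or.inr hx⟩⟩

theorem exists_ne_idx_iff (l : List (List Int)) (P : List Int → Prop) :
    ∀ (i : Nat) (hi : i < l.length),
    ((∃ k, ∃ _ : k < l.length, k ≠ i ∧ P l[k]) ↔ ∃ t ∈ l, P t ∧ (t ≠ l[i]'hi ∨ 2 ≤ l.count t)) := by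
  induction l with
  | nil => intro i hi; simp at hi
  | cons x xs ih =>
      intro i hi
      cases i with
      | zero =>
          constructor
          · rintro ⟨k, hk, hknz, hP⟩
            cases k with
            | zero => exact absurd rfl hknz
            | succ k' =>
                have hk' : k' < xs.length := by simpa using hk
                have hm : xs[k'] ∈ xs := List.getElem_mem hk'
                by_cases he : xs[k'] = x
                · refine ⟨x, List.mem_cons_self, by simpa [he] using hP, Or.inr ?_⟩
                  have hx1 : 1 ≤ xs.count x := List.count_pos_iff.mpr (he ▸ hm)
                  rw [List.count_cons_self]; omega
                · exact ⟨xs[k'], List.mem_cons_of_mem _ hm, hP, Or.inl (by simpa using he)⟩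
          · rintro ⟨t, htm, hP, hor⟩
            have htx : t ∈ xs := by
              rcases List.mem_cons.mp htm with rfl | h
              · rcases hor with h1 | h2
                · simp at h1
                · rw [List.count_cons_self] at h2
                  exact List.count_pos_iff.mp (by omega)
              · exact h
            obtain ⟨k', hk', hget⟩ := List.mem_iff_getElem.mp htx
            exact ⟨k'+1, by simpa using hk', by simp, by simpa [hget]⟩
      | succ j =>
          have hj : j < xs.length := by simpa using hi
          have hx : (x :: xs)[j+1] = xs[j] := by simp
          rw [hx]
          constructor
          · rintro ⟨k, hk, hknz, hP⟩
            cases k with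
            | zero =>
                by_cases he : x = xs[j]
                · refine ⟨x, List.mem_cons_self, hP, Or.inr ?_⟩
                  have : 1 ≤ xs.count x := List.count_pos_iff.mpr (he ▸ List.getElem_mem hj)
                  rw [List.count_cons_self]; omega
                · exact ⟨x, List.mem_cons_self, hP, Or.inl he⟩
            | succ k' =>
                have hk'' : k' < xs.length := by simpa using hk
                obtain ⟨t, htm, htP, hor⟩ :=
                  (ih j hj).mp ⟨k', hk'', by simpa using hknz, by simpa using hP⟩
                refine ⟨t, List.mem_cons_of_mem _ htm, htP, ?_⟩
                rcases hor with h1 | h2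
                · exact Or.inl h1
                · refine Or.inr (le_trans h2 ?_)
                  rw [List.count_cons]
                  exact Nat.le_add_right _ _
          · rintro ⟨t, htm, hP, hor⟩
            rcases List.mem_cons.mp htm with rfl | htx
            · exact ⟨0, by simp, by simp, hP⟩
            · by_cases he : x = t
              · subst he
                exact ⟨0, by simp, by simp, hP⟩
              · have hor' : t ≠ xs[j] ∨ 2 ≤ xs.count t := by
                  rcases hor with h1 | h2
                  · exact Or.inl h1
                  · rw [List.count_cons, if_neg (by simpa using he)] at h2
                    exact Or.inr (by omega)
                obtain ⟨k', hk', hknz, hPk⟩ := (ih j hj).mpr ⟨t, htx, hP, hor'⟩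
                exact ⟨k'+1, by simpa using hk', by simpa using hknz, by simpa using hPk⟩

theorem foldl_flag {α : Type} (l : List α) (C : α → Bool) (b : Bool) :
    l.foldl (fun acc q => if C q then false else acc) b = (b && l.all (fun q => !C q)) := by
  induction l generalizing b with
  | nil => simp
  | cons x xs ih =>
      rw [List.foldl_cons, List.all_cons]
      cases h : C x
      · simpa using ih b
      · simpa using ih false

theorem A_eq (cl : List (List Int)) :
    get_leafBranchSet cl = cl.filter (fun v => pvKeep (cl.map pvIdx) (pvIdx v)) := by
  unfold get_leafBranchSet
  rw [PySem.List.foldl_append_if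
    (fun p : Int × List Int => (PySem.List.enumerate cl).foldl (fun acc q =>
      if p.1 ≠ q.1 then (if intersect_is_self q.2 p.2 then false else acc) else acc) true)
    (fun p : Int × List Int => p.2) _ []]
  set K := cl.map pvIdx with hK
  have hmap : cl.filter (fun v => pvKeep K (pvIdx v))
      = ((PySem.List.enumerate cl).filter (fun p => pvKeep K (pvIdx p.2))).map (·.2) := by
    conv_lhs => rw [← PySem.List.map_snd_enumerate cl 0]
    rw [List.filter_map]
    simp only [Function.comp_def]
  rw [hmap, List.nil_append]
  congr 1
  apply List.filter_congr
  intro p hp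
  obtain ⟨k0, hk0, rfl⟩ := (PySem.List.mem_enumerate_iff cl 0 p).mp hp
  -- inner fold: convert double-if to single-if and use foldl_flag
  have hstep : (fun (acc : Bool) (q : Int × List Int) =>
      if (0 + (k0:Int)) ≠ q.1 then (if intersect_is_self q.2 cl[k0] then false else acc) else acc)
      = (fun acc q => if (decide ((0 + (k0:Int)) ≠ q.1) && intersect_is_self q.2 cl[k0]) then false else acc) := by
    funext acc q
    by_cases h1 : (0 + (k0:Int)) ≠ q.1 <;> cases h2 : intersect_is_self q.2 cl[k0] <;>
      simp_all
  dsimp only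
  rw [hstep, foldl_flag, Bool.true_and, Bool.eq_iff_iff, List.all_eq_true]
  simp only [pvKeep, decide_eq_true_eq]
  have hlen : k0 < K.length := by simp [hK]; omega
  have hget : K[k0]'hlen = pvIdx cl[k0] := by simp [hK]
  rw [← hget]
  rw [← exists_ne_idx_iff K (fun t => ∀ x ∈ t, x ∈ K[k0]'hlen) k0 hlen]
  simp only [hK, List.getElem_map, List.length_map]
  constructor
  · intro h
    rintro ⟨k, hk, hne, hsub⟩
    have := h ((0:Int) + (k:Int), cl[k]) ((PySem.List.mem_enumerate_iff cl 0 _).mpr ⟨k, hk, rfl⟩)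
    simp only [Bool.not_eq_eq_eq_not, Bool.not_true, Bool.and_eq_false_iff] at this
    rcases this with h1 | h2
    · exact hne (Eq.symm (by simpa using (of_decide_eq_false h1)))
    · have : intersect_is_self cl[k] cl[k0] = true := by
        rw [intersect_is_self_iff]
        intro x hx
        exact hsub x (by simpa using hx)
      rw [this] at h2; cases h2
  · intro h q hq
    obtain ⟨k, hk, rfl⟩ := (PySem.List.mem_enumerate_iff cl 0 q).mp hq
    simp only [Bool.not_eq_eq_eq_not, Bool.not_true, Bool.and_eq_false_iff]
    by_cases hne : k = k0
    · subst hne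
      left
      simp
    · cases hinter : intersect_is_self cl[k] cl[k0]
      · right; rfl
      · exfalso
        refine h ⟨k, hk, hne, ?_⟩
        have := (intersect_is_self_iff cl[k] cl[k0]).mp hinter
        simpa using this

theorem B_eq (cl : List (List Int)) :
    get_leafBranchSet_alt cl = cl.filter (fun v => pvKeep (cl.map pvIdx) (pvIdx v)) := by
  unfold get_leafBranchSet_alt
  have hidx : (fun v => (PySem.List.enumerate v).foldl (fun acc p => if p.2 == 1 then acc ++ [p.1] else acc) ([] : List Int)) = pvIdx :=
    funext pvIdx_fold
  rw [hidx]
  dsimp only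
  rw [PySem.Dict.foldl_insert_getD_add_one_eq_counter]
  set idxs := cl.map pvIdx with hidxs
  have hzip : cl.zip idxs = cl.map (fun v => (v, pvIdx v)) := by
    rw [hidxs]
    simpa using (List.zip_map' (f := id) (g := pvIdx) (l := cl))
  rw [hzip]
  -- flip the if
  have hstep : (fun (out : List (List Int)) (p : List Int × List Int) =>
      if (PySem.Dict.counter idxs).items.any (fun tc => (!(tc.1 == p.2) || decide (1 < tc.2)) && isSortedSubset tc.1 p.2)
      then out else out ++ [p.1])
      = (fun out p =>
      if !((PySem.Dict.counter idxs).items.any (fun tc => (!(tc.1 == p.2) || decide (1 < tc.2)) && isSortedSubset tc.1 p.2))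
      then out ++ [p.1] else out) := by
    funext out p
    cases h : (PySem.Dict.counter idxs).items.any (fun tc => (!(tc.1 == p.2) || decide (1 < tc.2)) && isSortedSubset tc.1 p.2) <;> simp_all
  rw [hstep,
    PySem.List.foldl_append_if _ (fun p : List Int × List Int => p.1) _ []]
  rw [List.filter_map, List.map_map]
  simp only [Function.comp_def, List.map_id', List.nil_append]
  apply List.filter_congr
  intro v _
  have hpt : ∀ t ∈ idxs, ((!(t == pvIdx v) || decide ((1:Int) < ((idxs.count t : Int)))) && isSortedSubset t (pvIdx v)) = true
      ↔ ((∀ x ∈ t, x ∈ pvIdx v) ∧ (t ≠ pvIdx v ∨ 2 ≤ idxs.count t)) := by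
    intro t ht
    obtain ⟨w, _, rfl⟩ := List.mem_map.mp (hidxs ▸ ht)
    rw [Bool.and_eq_true, Bool.or_eq_true,
      isSortedSubset_iff _ _ (pvIdx_sorted w) (pvIdx_sorted v)]
    have hc : (decide ((1:Int) < ((idxs.count (pvIdx w) : Int))) = true) ↔ 2 ≤ idxs.count (pvIdx w) := by
      simp; omega
    simp only [Bool.not_eq_eq_eq_not, Bool.not_true, beq_eq_false_iff_ne, ne_eq, hc]
    tauto
  rw [Bool.eq_iff_iff]
  rw [PySem.Dict.items_counter, List.any_map]
  simp only [Function.comp_def]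
  rw [Bool.not_eq_true', List.any_eq_false]
  simp only [pvKeep, decide_eq_true_eq]
  constructor
  · intro h
    rintro ⟨t, ht, hsub, hor⟩
    exact (h t (PySem.Set.mem_ofList idxs t |>.mpr ht)) ((hpt t ht).mpr ⟨hsub, hor⟩)
  · intro h t ht hcontra
    have ht' : t ∈ idxs := (PySem.Set.mem_ofList idxs t).mp ht
    obtain ⟨hsub, hor⟩ := (hpt t ht').mp hcontra
    exact h ⟨t, ht', hsub, hor⟩

-- ===== VERDICT (by name: the statement is the Claim_ definition above) =====
theorem get_leafBranchSet_spec : Claim_equal_get_leafBranchSet := by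
  intro cl _
  unfold Spec_get_leafBranchSet
  rw [A_eq, B_eq]
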